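-- pv_equiv track=rewrite | github.com/nankotsu-ballista/engineer-bootcamp | ABC414-C.py | solve
-- ===== SOURCE A (Python) =====
-- def is_palindrome(s: str) -> bool:
--
--     return s == s[::-1]
--
-- def to_base(x: int, base: int) -> str:
--
--     res = ''
--
--     while x > 0:
--
--         res = str(x % base) + res
--
--         x //= base
--
--     return res if res else '0'
--
-- def solve(A: int, N: int) -> int:
--
--     total = 0
--
--     i = 1
--
--
--
--     while True:
--
--         # 奇数桁の回文（例: 12321）
--
--         s = str(i)
--
--         p1 = int(s + s[-2::-1])
--
--         if p1 > N:
--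
--             break
--
--         if is_palindrome(to_base(p1, A)):
--
--             total += p1
--
--
--
--         # 偶数桁の回文（例: 1221）
--
--         p2 = int(s + s[::-1])
--
--         if p2 <= N and is_palindrome(to_base(p2, A)):
--
--             total += p2
--
--
--
--         i += 1
--
--
--
--     return total
-- ===== SOURCE B (Python) =====
-- def is_palindrome(s: str) -> bool:
--     return s == s[::-1]
--
-- def to_base(x: int, base: int) -> str:
--     res = ''
--     while x > 0:
--         res = str(x % base) + res
--         x //= base
--     return res if res else '0'
--
-- def rev10(x: int) -> int:
--     r = 0
--     while x > 0:
--         r = 10 * r + x % 10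
--         x //= 10
--     return r
--
-- def solve(A: int, N: int) -> int:
--     # Enumerate decimal palindromes purely arithmetically, stratified by digit
--     # length L: each palindrome of length L is h * 10**(L//2) + rev10(h // d)
--     # for a half h in [10**((L-1)//2), 10**((L+1)//2)); no string mirroring.
--     total = 0
--     L = 1
--     while 10 ** (L - 1) <= N:
--         lo = 10 ** ((L - 1) // 2)
--         hi = 10 ** ((L + 1) // 2)
--         mid = 10 ** (L // 2)
--         d = 10 if L % 2 else 1
--         for h in range(lo, hi):
--             p = h * mid + rev10(h // d)
--             if p > N:
--                 break
--             if is_palindrome(to_base(p, A)):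
--                 total += p
--         L += 1
--     return total
-- ===== Notes on version B (the rewrite author's own statement) =====
-- stated objective: alternative
-- what changed: B enumerates the decimal palindromes purely arithmetically, stratified by digit length L (each palindrome is h * 10**(L//2) + rev10(h // d) for a half h in an explicit per-length range), instead of A's construction by string slicing/mirroring and re-parsing (int(s + s[::-1])) inside a single unbounded while-loop; Pre_ excludes only the inputs where A never returns a value (N >= 1 with A = 0 raises ZeroDivisionError in to_base, N >= 1 with A = 1 makes to_base loop forever).
import Mathlib
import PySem

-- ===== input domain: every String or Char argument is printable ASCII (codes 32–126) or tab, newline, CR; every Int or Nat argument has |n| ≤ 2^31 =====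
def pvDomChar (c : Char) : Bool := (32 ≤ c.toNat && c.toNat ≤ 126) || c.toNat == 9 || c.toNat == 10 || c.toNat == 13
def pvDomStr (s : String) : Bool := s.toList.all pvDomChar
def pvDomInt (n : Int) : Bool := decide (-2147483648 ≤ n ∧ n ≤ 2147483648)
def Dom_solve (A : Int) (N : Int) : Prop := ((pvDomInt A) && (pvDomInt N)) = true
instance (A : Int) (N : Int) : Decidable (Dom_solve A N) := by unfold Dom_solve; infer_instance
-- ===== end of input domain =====

-- B enumerates decimal palindromes purely arithmetically, stratified by digit length
-- (half * 10^k + rev10 of the half), instead of A's string mirroring in an unbounded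
-- while-loop; objective: alternative (arithmetic instead of string manipulation).
-- Ports work on List Char (the .toList view of the Python strings).

-- ===== PORT A =====

-- helper is_palindrome(s): s == s[::-1]
def pvIsPal (cs : List Char) : Bool := cs == ((PySem.List.slice? cs none none (-1)).getD [])

-- int(s) for the arguments this program builds: s is always a nonempty string of
-- decimal digits 0-9 (no sign/space/underscore), where int() is exactly this fold.
def intDigits (cs : List Char) : Int := ((cs.foldl (fun a c => 10 * a + (c.toNat - 48)) 0 : Nat) : Int)

-- helper to_base(x, base): the while-loop, with fuel x.toNat (sufficient for every
-- base reached under Pre_: base ≥ 2 strictly shrinks x, base < 0 makes x ≤ 0 at once)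
def toBaseLoop : Nat → Int → Int → List Char → List Char
  | 0, _, _, res => res
  | f + 1, x, base, res =>
      if 0 < x then
        toBaseLoop f (PySem.Int.floordiv x base) base (PySem.Int.toChars (PySem.Int.mod x base) ++ res)
      else res

def toBase (x base : Int) : List Char :=
  let res := toBaseLoop x.toNat x base []
  if res = [] then ['0'] else res

-- the while True loop of solve; fuel N.toNat + 1 (the loop breaks at the latest at
-- i = N + 1, since the odd mirror of i is ≥ i)
def solveLoop : Nat → Int → Int → Int → Int → Int
  | 0, _, _, _, total => total
  | f + 1, A, N, i, total =>
      let s := PySem.Int.toChars i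
      let p1 := intDigits (s ++ ((PySem.List.slice? s (some (-2)) none (-1)).getD []))
      if p1 > N then total
      else
        let t1 := if pvIsPal (toBase p1 A) = true then total + p1 else total
        let p2 := intDigits (s ++ ((PySem.List.slice? s none none (-1)).getD []))
        let t2 := if p2 ≤ N ∧ pvIsPal (toBase p2 A) = true then t1 + p2 else t1
        solveLoop f A N (i + 1) t2

def solve (A : Int) (N : Int) : Int := solveLoop (N.toNat + 1) A N 1 0

-- ===== PORT B =====

-- rev10(x): the while-loop, fuel x.toNat
def rev10Loop : Nat → Int → Int → Int
  | 0, _, r => r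
  | f + 1, x, r =>
      if 0 < x then rev10Loop f (PySem.Int.floordiv x 10) (10 * r + PySem.Int.mod x 10) else r

def rev10 (x : Int) : Int := rev10Loop x.toNat x 0

-- the inner `for h in range(lo, hi)` with its break, as recursion on the count hi - lo
def innerLoopB : Nat → Int → Int → Int → Int → Int → Int → Int
  | 0, _, _, _, _, _, total => total
  | c + 1, h, mid, d, A, N, total =>
      let p := h * mid + rev10 (PySem.Int.floordiv h d)
      if p > N then total
      else innerLoopB c (h + 1) mid d A N (if pvIsPal (toBase p A) = true then total + p else total)

-- the outer `while 10 ** (L - 1) <= N` loop; fuel N.toNat + 2 (the condition fails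
-- at the latest at L = N + 2)
def outerLoopB : Nat → Int → Int → Int → Int → Int
  | 0, _, _, _, total => total
  | f + 1, A, N, L, total =>
      if (10 : Int) ^ (L - 1).toNat ≤ N then
        let lo := (10 : Int) ^ (PySem.Int.floordiv (L - 1) 2).toNat
        let hi := (10 : Int) ^ (PySem.Int.floordiv (L + 1) 2).toNat
        let mid := (10 : Int) ^ (PySem.Int.floordiv L 2).toNat
        let d := if PySem.Int.mod L 2 ≠ 0 then (10 : Int) else 1
        outerLoopB f A N (L + 1) (innerLoopB (hi - lo).toNat lo mid d A N total)
      else total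

def solve_alt (A : Int) (N : Int) : Int := outerLoopB (N.toNat + 2) A N 1 0

-- ===== PRECONDITION & SPEC =====

-- Pre_ excludes exactly the inputs on which the Python A never returns: with N ≥ 1 the
-- loop reaches to_base, which raises ZeroDivisionError for A = 0 and loops forever for A = 1.
def Pre_solve (A : Int) (N : Int) : Prop := 1 ≤ N → (A ≠ 0 ∧ A ≠ 1)
instance (A : Int) (N : Int) : Decidable (Pre_solve A N) := by unfold Pre_solve; infer_instance

def pvWitness_solve : Int × Int := (2, 100)

def Spec_solve (A : Int) (N : Int) (out : Int) : Prop := out = solve_alt A N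
instance (A : Int) (N : Int) (out : Int) : Decidable (Spec_solve A N out) := by unfold Spec_solve; infer_instance

-- ===== CLAIM (what is proved, stated in full; the proofs are below) =====
def Claim_equal_solve : Prop := ∀ (A : Int) (N : Int), Dom_solve A N → Pre_solve A N → Spec_solve A N (solve A N)

-- ===== LEMMAS AND PROOFS =====

-- digit values and the value of a big-endian digit string
def dV (c : Char) : Nat := c.toNat - 48
def valC (cs : List Char) : Nat := cs.foldl (fun a c => 10 * a + dV c) 0

lemma intDigits_eq (cs : List Char) : intDigits cs = ((valC cs : Nat) : Int) := rfl

def CanonD (cs : List Char) : Prop :=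
  cs ≠ [] ∧ (∀ c ∈ cs, c.isDigit = true) ∧ cs.head? ≠ some '0'

lemma valC_foldl (cs : List Char) (a : Nat) :
    cs.foldl (fun a c => 10 * a + dV c) a = a * 10 ^ cs.length + valC cs := by
  induction cs generalizing a with
  | nil => simp [valC]
  | cons c t ih =>
      simp only [List.foldl_cons, List.length_cons, valC]
      rw [ih (10 * a + dV c), ih (10 * 0 + dV c)]
      ring

lemma valC_cons (c : Char) (t : List Char) :
    valC (c :: t) = dV c * 10 ^ t.length + valC t := by
  show (c :: t).foldl (fun a c => 10 * a + dV c) 0 = _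
  rw [List.foldl_cons, valC_foldl]
  ring_nf

lemma valC_append (xs ys : List Char) :
    valC (xs ++ ys) = valC xs * 10 ^ ys.length + valC ys := by
  show (xs ++ ys).foldl (fun a c => 10 * a + dV c) 0 = _
  rw [List.foldl_append, valC_foldl]
  rfl

lemma isDigit_toNat {c : Char} (h : c.isDigit = true) : 48 ≤ c.toNat ∧ c.toNat ≤ 57 := by
  simp only [Char.isDigit, Bool.and_eq_true, decide_eq_true_eq] at h
  obtain ⟨h1, h2⟩ := h
  exact ⟨h1, h2⟩

lemma char_eq_of_toNat_eq {a b : Char} (h : a.toNat = b.toNat) : a = b := by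
  apply Char.ext
  exact UInt32.toNat_inj.mp h

lemma dV_lt {c : Char} (h : c.isDigit = true) : dV c < 10 := by
  have := isDigit_toNat h; unfold dV; omega

lemma dV_pos {c : Char} (h : c.isDigit = true) (h0 : c ≠ '0') : 1 ≤ dV c := by
  have h1 := isDigit_toNat h
  have : c.toNat ≠ 48 := fun hc => h0 (char_eq_of_toNat_eq (by simpa using hc))
  unfold dV; omega

lemma valC_lt {cs : List Char} (h : ∀ c ∈ cs, c.isDigit = true) :
    valC cs < 10 ^ cs.length := by
  induction cs with
  | nil => simp [valC]
  | cons c t ih =>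
      rw [valC_cons]
      have hc := dV_lt (h c (by simp))
      have ht := ih (fun x hx => h x (by simp [hx]))
      have : dV c * 10 ^ t.length ≤ 9 * 10 ^ t.length :=
        Nat.mul_le_mul_right _ (by omega)
      simp only [List.length_cons, pow_succ]
      omega

lemma valC_ge {cs : List Char} (h : CanonD cs) : 10 ^ (cs.length - 1) ≤ valC cs := by
  obtain ⟨hne, hdig, hhd⟩ := h
  cases cs with
  | nil => simp at hne
  | cons c t =>
      rw [valC_cons]
      have : 1 ≤ dV c := dV_pos (hdig c (by simp)) (by intro hc; exact hhd (by simp [hc]))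
      have : 1 * 10 ^ t.length ≤ dV c * 10 ^ t.length := Nat.mul_le_mul_right _ this
      simp only [List.length_cons, Nat.add_sub_cancel]
      omega

lemma valC_pos {cs : List Char} (h : CanonD cs) : 1 ≤ valC cs := by
  have := valC_ge h
  have : (1:Nat) ≤ 10 ^ (cs.length - 1) := Nat.one_le_pow _ _ (by norm_num)
  omega

-- digitChar facts
lemma digitChar_toNat {d : Nat} (h : d < 10) : (Nat.digitChar d).toNat = 48 + d := by
  interval_cases d <;> rfl

lemma digitChar_ne_zero {d : Nat} (h : d < 10) (h0 : d ≠ 0) : Nat.digitChar d ≠ '0' := by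
  interval_cases d <;> simp_all <;> decide

lemma dV_digitChar {d : Nat} (h : d < 10) : dV (Nat.digitChar d) = d := by
  unfold dV; rw [digitChar_toNat h]; omega

lemma digitChar_dV {c : Char} (h : c.isDigit = true) : Nat.digitChar (dV c) = c := by
  apply char_eq_of_toNat_eq
  have h1 := isDigit_toNat h
  rw [digitChar_toNat (by unfold dV; omega)]
  unfold dV; omega

-- Nat.toDigits 10 facts
lemma toDigits_digits (n : Nat) : ∀ c ∈ Nat.toDigits 10 n, c.isDigit = true :=
  fun c hc => Nat.isDigit_of_mem_toDigits (by norm_num) (by norm_num) hc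

lemma valC_toDigits (n : Nat) : valC (Nat.toDigits 10 n) = n := by
  induction n using Nat.strong_induction_on with
  | _ n ih =>
      by_cases h : n < 10
      · rw [Nat.toDigits_of_lt_base h]
        show valC [_] = n
        rw [valC_cons]
        simp [valC, dV_digitChar h]
      · push_neg at h
        rw [Nat.toDigits_of_base_le (by norm_num) h]
        rw [valC_append, ih (n / 10) (by omega)]
        have h1 : valC [(n % 10).digitChar] = n % 10 := by
          rw [valC_cons]; simp [valC, dV_digitChar (Nat.mod_lt _ (by norm_num))]
        simp only [List.length_singleton, h1]
        omega

lemma toDigits_ne_nil (n : Nat) : Nat.toDigits 10 n ≠ [] := by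
  have := Nat.length_toDigits_pos (b := 10) (n := n)
  intro h; rw [h] at this; simp at this

lemma head?_toDigits (n : Nat) (hn : 0 < n) : (Nat.toDigits 10 n).head? ≠ some '0' := by
  induction n using Nat.strong_induction_on with
  | _ n ih =>
      by_cases h : n < 10
      · rw [Nat.toDigits_of_lt_base h]
        simp only [List.head?_cons, ne_eq, Option.some.injEq]
        exact digitChar_ne_zero h (by omega)
      · push_neg at h
        rw [Nat.toDigits_of_base_le (by norm_num) h]
        rw [List.head?_append_of_ne_nil _ (toDigits_ne_nil (n / 10))]
        exact ih (n / 10) (by omega) (by omega)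

lemma canon_toDigits {n : Nat} (hn : 0 < n) : CanonD (Nat.toDigits 10 n) :=
  ⟨toDigits_ne_nil n, toDigits_digits n, head?_toDigits n hn⟩

lemma toDigits_valC {cs : List Char} (h : CanonD cs) : Nat.toDigits 10 (valC cs) = cs := by
  induction cs using List.reverseRecOn with
  | nil => exact absurd rfl h.1
  | append_singleton t c ih =>
      rcases t.eq_nil_or_concat' with h0 | ⟨t', c', rfl⟩
      · subst h0
        have hc : c.isDigit = true := h.2.1 c (by simp)
        show Nat.toDigits 10 (valC [c]) = [c]
        rw [valC_cons]
        simp only [valC, List.length_nil, pow_zero, Nat.mul_one, List.foldl_nil, Nat.add_zero]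
        rw [Nat.toDigits_of_lt_base (dV_lt hc), digitChar_dV hc]
      · set t := t' ++ [c'] with ht
        have htne : t ≠ [] := by simp [ht]
        have hcanon_t : CanonD t := by
          refine ⟨htne, fun x hx => h.2.1 x (by simp [hx]), ?_⟩
          have : (t ++ [c]).head? = t.head? := List.head?_append_of_ne_nil _ htne
          rw [← this]; exact h.2.2
        have hc : c.isDigit = true := h.2.1 c (by simp)
        rw [valC_append]
        have h1 : valC [c] = dV c := by rw [valC_cons]; simp [valC]
        simp only [List.length_singleton, pow_one, h1]
        rw [show valC t * 10 + dV c = 10 * valC t + dV c by ring]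
        rw [← Nat.toDigits_append_toDigits (b := 10) (by norm_num) (valC_pos hcanon_t) (dV_lt hc)]
        rw [ih hcanon_t, Nat.toDigits_of_lt_base (dV_lt hc), digitChar_dV hc]

lemma toDigits_lt (n : Nat) : n < 10 ^ (Nat.toDigits 10 n).length := by
  conv_lhs => rw [← valC_toDigits n]
  exact valC_lt (toDigits_digits n)

lemma toDigits_ge {n : Nat} (hn : 0 < n) : 10 ^ ((Nat.toDigits 10 n).length - 1) ≤ n := by
  conv_rhs => rw [← valC_toDigits n]
  exact valC_ge (canon_toDigits hn)

lemma toDigits_len_mono {m n : Nat} (hm : 0 < m) (h : m ≤ n) :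
    (Nat.toDigits 10 m).length ≤ (Nat.toDigits 10 n).length := by
  by_contra hc
  push_neg at hc
  have h1 := toDigits_lt n
  have h2 := toDigits_ge hm
  have h3 : 10 ^ (Nat.toDigits 10 n).length ≤ 10 ^ ((Nat.toDigits 10 m).length - 1) :=
    Nat.pow_le_pow_right (by norm_num) (by omega)
  omega

-- the two mirrored palindromes of an integer half i ≥ 1
def q1 (n : Nat) : Nat := valC (Nat.toDigits 10 n ++ (Nat.toDigits 10 n).dropLast.reverse)
def q2 (n : Nat) : Nat := valC (Nat.toDigits 10 n ++ (Nat.toDigits 10 n).reverse)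

lemma canon_q1 {n : Nat} (hn : 0 < n) :
    CanonD (Nat.toDigits 10 n ++ (Nat.toDigits 10 n).dropLast.reverse) := by
  obtain ⟨h1, h2, h3⟩ := canon_toDigits hn
  refine ⟨by simp [h1], ?_, ?_⟩
  · intro c hc
    rcases List.mem_append.1 hc with hc | hc
    · exact h2 c hc
    · exact h2 c (List.mem_of_mem_dropLast (List.mem_reverse.1 hc))
  · rw [List.head?_append_of_ne_nil _ h1]; exact h3

lemma canon_q2 {n : Nat} (hn : 0 < n) :
    CanonD (Nat.toDigits 10 n ++ (Nat.toDigits 10 n).reverse) := by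
  obtain ⟨h1, h2, h3⟩ := canon_toDigits hn
  refine ⟨by simp [h1], ?_, ?_⟩
  · intro c hc
    rcases List.mem_append.1 hc with hc | hc
    · exact h2 c hc
    · exact h2 c (List.mem_reverse.1 hc)
  · rw [List.head?_append_of_ne_nil _ h1]; exact h3

lemma toDigits_q1 {n : Nat} (hn : 0 < n) :
    Nat.toDigits 10 (q1 n) = Nat.toDigits 10 n ++ (Nat.toDigits 10 n).dropLast.reverse :=
  toDigits_valC (canon_q1 hn)

lemma toDigits_q2 {n : Nat} (hn : 0 < n) :
    Nat.toDigits 10 (q2 n) = Nat.toDigits 10 n ++ (Nat.toDigits 10 n).reverse :=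
  toDigits_valC (canon_q2 hn)

lemma q1_len {n : Nat} (hn : 0 < n) :
    (Nat.toDigits 10 (q1 n)).length = 2 * (Nat.toDigits 10 n).length - 1 := by
  rw [toDigits_q1 hn]
  rw [List.length_append, List.length_reverse, List.length_dropLast]
  have := Nat.length_toDigits_pos (b := 10) (n := n)
  omega

lemma q2_len {n : Nat} (hn : 0 < n) :
    (Nat.toDigits 10 (q2 n)).length = 2 * (Nat.toDigits 10 n).length := by
  rw [toDigits_q2 hn]
  rw [List.length_append, List.length_reverse]
  omega

lemma q1_eq (n : Nat) :
    q1 n = n * 10 ^ ((Nat.toDigits 10 n).length - 1) + valC (Nat.toDigits 10 n).dropLast.reverse := by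
  unfold q1
  rw [valC_append, valC_toDigits]
  rw [List.length_reverse, List.length_dropLast]

lemma q2_eq (n : Nat) :
    q2 n = n * 10 ^ (Nat.toDigits 10 n).length + valC (Nat.toDigits 10 n).reverse := by
  unfold q2
  rw [valC_append, valC_toDigits]
  rw [List.length_reverse]

lemma q1_ge (n : Nat) : n ≤ q1 n := by
  rw [q1_eq]
  have : 1 ≤ 10 ^ ((Nat.toDigits 10 n).length - 1) := Nat.one_le_pow _ _ (by norm_num)
  have : n * 1 ≤ n * 10 ^ ((Nat.toDigits 10 n).length - 1) := Nat.mul_le_mul_left _ this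
  omega

lemma q1_lt_pow {n : Nat} (hn : 0 < n) : q1 n < 10 ^ (2 * (Nat.toDigits 10 n).length - 1) := by
  have := toDigits_lt (q1 n)
  rwa [q1_len hn] at this

lemma q2_ge_pow {n : Nat} (hn : 0 < n) : 10 ^ (2 * (Nat.toDigits 10 n).length - 1) ≤ q2 n := by
  have := toDigits_ge (n := q2 n) (by
    have h := q1_ge n
    have := valC_pos (canon_q2 hn)
    unfold q2 at *
    omega)
  rwa [q2_len hn, show 2 * (Nat.toDigits 10 n).length - 1 = 2 * (Nat.toDigits 10 n).length - 1 from rfl] at this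

lemma q1_le_q2 {n : Nat} (hn : 0 < n) : q1 n ≤ q2 n :=
  le_trans (le_of_lt (q1_lt_pow hn)) (q2_ge_pow hn)

lemma q1_strict_mono {m n : Nat} (hm : 0 < m) (h : m < n) : q1 m < q1 n := by
  have hn : 0 < n := by omega
  have hlen := toDigits_len_mono hm (le_of_lt h)
  by_cases he : (Nat.toDigits 10 m).length = (Nat.toDigits 10 n).length
  · rw [q1_eq m, q1_eq n, he]
    have hr : valC (Nat.toDigits 10 m).dropLast.reverse < 10 ^ ((Nat.toDigits 10 n).length - 1) := by
      have := valC_lt (cs := (Nat.toDigits 10 m).dropLast.reverse)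
        (fun c hc => toDigits_digits m c (List.mem_of_mem_dropLast (List.mem_reverse.1 hc)))
      have hl : ((Nat.toDigits 10 m).dropLast.reverse).length = (Nat.toDigits 10 m).length - 1 := by
        simp [List.length_reverse, List.length_dropLast]
      rw [hl, he] at this
      exact this
    have : (m + 1) * 10 ^ ((Nat.toDigits 10 n).length - 1) ≤ n * 10 ^ ((Nat.toDigits 10 n).length - 1) :=
      Nat.mul_le_mul_right _ (by omega)
    nlinarith [Nat.zero_le (valC (Nat.toDigits 10 n).dropLast.reverse)]
  · have hlt : (Nat.toDigits 10 m).length < (Nat.toDigits 10 n).length := by omega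
    have h1 : q1 m < 10 ^ (2 * (Nat.toDigits 10 m).length - 1) := q1_lt_pow hm
    have h2 : 10 ^ (2 * (Nat.toDigits 10 n).length - 2) ≤ q1 n := by
      have := toDigits_ge (n := q1 n) (by have := q1_ge n; omega)
      rw [q1_len hn] at this
      have hp := Nat.length_toDigits_pos (b := 10) (n := n)
      rw [show 2 * (Nat.toDigits 10 n).length - 2
            = 2 * (Nat.toDigits 10 n).length - 1 - 1 by omega]
      exact this
    have h3 : 10 ^ (2 * (Nat.toDigits 10 m).length - 1) ≤ 10 ^ (2 * (Nat.toDigits 10 n).length - 2) :=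
      Nat.pow_le_pow_right (by norm_num) (by omega)
    omega

lemma q2_strict_mono {m n : Nat} (hm : 0 < m) (h : m < n) : q2 m < q2 n := by
  have hn : 0 < n := by omega
  have hlen := toDigits_len_mono hm (le_of_lt h)
  by_cases he : (Nat.toDigits 10 m).length = (Nat.toDigits 10 n).length
  · rw [q2_eq m, q2_eq n, he]
    have hr : valC (Nat.toDigits 10 m).reverse < 10 ^ (Nat.toDigits 10 n).length := by
      have := valC_lt (cs := (Nat.toDigits 10 m).reverse)
        (fun c hc => toDigits_digits m c (List.mem_reverse.1 hc))
      rw [List.length_reverse, he] at this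
      exact this
    have : (m + 1) * 10 ^ (Nat.toDigits 10 n).length ≤ n * 10 ^ (Nat.toDigits 10 n).length :=
      Nat.mul_le_mul_right _ (by omega)
    nlinarith [Nat.zero_le (valC (Nat.toDigits 10 n).reverse)]
  · have hlt : (Nat.toDigits 10 m).length < (Nat.toDigits 10 n).length := by omega
    have h1 : q2 m < 10 ^ (2 * (Nat.toDigits 10 m).length) := by
      have := toDigits_lt (q2 m); rwa [q2_len hm] at this
    have h2 : 10 ^ (2 * (Nat.toDigits 10 n).length - 1) ≤ q2 n := q2_ge_pow hn
    have h3 : 10 ^ (2 * (Nat.toDigits 10 m).length) ≤ 10 ^ (2 * (Nat.toDigits 10 n).length - 1) :=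
      Nat.pow_le_pow_right (by norm_num) (by omega)
    omega

lemma q1_mono {m n : Nat} (hm : 0 < m) (h : m ≤ n) : q1 m ≤ q1 n := by
  rcases eq_or_lt_of_le h with rfl | h
  · exact le_rfl
  · exact le_of_lt (q1_strict_mono hm h)

-- evaluation lemmas for the ports
lemma toChars_natCast (k : Nat) : PySem.Int.toChars (k : Int) = Nat.toDigits 10 k := by
  unfold PySem.Int.toChars
  simp

lemma filterMap_congr' {α β : Type} (l : List α) (f g : α → Option β)
    (h : ∀ a ∈ l, f a = g a) : l.filterMap f = l.filterMap g := by
  induction l with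
  | nil => simp
  | cons a t ih =>
      simp only [List.filterMap_cons]
      rw [h a (by simp)]
      cases g a <;> simp [ih (fun x hx => h x (by simp [hx]))]

lemma fm_take : ∀ (m : Nat) (xs : List Char), m < xs.length →
    List.filterMap (fun k => xs[m - k]?) (List.range (m + 1)) = (xs.take (m + 1)).reverse := by
  intro m
  induction m with
  | zero =>
      intro xs h
      cases xs with
      | nil => simp at h
      | cons a l => simp [List.range_one]
  | succ m ih =>
      intro xs h
      have h0 : xs[m + 1 - 0]? = some xs[m + 1] := List.getElem?_eq_getElem h
      rw [List.range_succ_eq_map, List.filterMap_cons, h0, List.filterMap_map]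
      have hfun : List.filterMap ((fun k => xs[m + 1 - k]?) ∘ fun i => i + 1) (List.range (m + 1)) =
          List.filterMap (fun k => xs[m - k]?) (List.range (m + 1)) := by
        apply filterMap_congr'
        intro a _
        simp [Nat.succ_sub_succ]
      rw [hfun, ih xs (by omega)]
      have hsplit : List.take (m + 1 + 1) xs = List.take (m + 1) xs ++ [xs[m + 1]] := by
        rw [List.take_add_one, List.getElem?_eq_getElem h]
        rfl
      show xs[m + 1] :: (List.take (m + 1) xs).reverse = (List.take (m + 1 + 1) xs).reverse
      rw [hsplit, List.reverse_append]
      simp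

lemma dropLast_eq_take' (l : List Char) : l.dropLast = l.take (l.length - 1) := by
  induction l with
  | nil => simp
  | cons a t ih =>
      cases t with
      | nil => simp
      | cons b u =>
          simp only [List.dropLast_cons₂, List.length_cons, Nat.add_sub_cancel,
            List.take_succ_cons]
          rw [ih]
          simp

lemma slice_m2 (cs : List Char) :
    PySem.List.slice? cs (some (-2)) none (-1) = some cs.dropLast.reverse := by
  unfold PySem.List.slice? PySem.List.sliceIndices
  rw [if_neg (by norm_num)]
  simp only [show ((-1 : Int) < 0) ↔ True from by norm_num,
    show ((0 : Int) < -1) ↔ False from by norm_num,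
    show ((-2 : Int) < 0) ↔ True from by norm_num, if_true, if_false]
  by_cases hL : cs.length ≤ 1
  · rcases cs with _ | ⟨a, _ | ⟨b, t⟩⟩
    · decide
    · norm_num
    · simp at hL
  · push_neg at hL
    rw [max_eq_left (show (-1 : Int) ≤ -2 + ↑cs.length by omega)]
    rw [if_pos (show (-1 : Int) < -2 + ↑cs.length by omega)]
    have hfun : (fun x : Nat => cs[((-2 : Int) + ↑cs.length + -1 * ↑x).toNat]?) =
        (fun k : Nat => cs[cs.length - 2 - k]?) := funext fun k => by congr 1; omega
    rw [hfun]
    rw [show (- - 1 : Int) = 1 from by norm_num]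
    rw [show (((-2 : Int) + ↑cs.length - -1 + 1 - 1) / 1).toNat = cs.length - 2 + 1 from by omega]
    rw [fm_take (cs.length - 2) cs (by omega)]
    rw [dropLast_eq_take']
    rw [show cs.length - 2 + 1 = cs.length - 1 from by omega]

lemma p1_eval (k : Nat) :
    intDigits (PySem.Int.toChars (k : Int) ++
      ((PySem.List.slice? (PySem.Int.toChars (k : Int)) (some (-2)) none (-1)).getD [])) = (q1 k : Int) := by
  rw [toChars_natCast, slice_m2, intDigits_eq]
  rfl

lemma p2_eval (k : Nat) :
    intDigits (PySem.Int.toChars (k : Int) ++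
      ((PySem.List.slice? (PySem.Int.toChars (k : Int)) none none (-1)).getD [])) = (q2 k : Int) := by
  rw [toChars_natCast, PySem.List.slice?_none_none_neg_one, intDigits_eq]
  rfl

-- the per-index contribution of A's loop, with N.toNat = M
def pvTerm (A : Int) (M : Nat) (j : Nat) : Int :=
  (if q1 j ≤ M ∧ pvIsPal (toBase ((q1 j : Nat) : Int) A) = true then ((q1 j : Nat) : Int) else 0) +
  (if q2 j ≤ M ∧ pvIsPal (toBase ((q2 j : Nat) : Int) A) = true then ((q2 j : Nat) : Int) else 0)

lemma pvTerm_zero {A : Int} {M : Nat} {j : Nat} (h : ¬ q1 j ≤ M) (h2 : ¬ q2 j ≤ M) :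
    pvTerm A M j = 0 := by
  unfold pvTerm
  rw [if_neg (fun hc => h hc.1), if_neg (fun hc => h2 hc.1)]
  simp

lemma solveLoop_sum (A : Int) (M : Nat) :
    ∀ (f : Nat) (k : Nat) (total : Int), 1 ≤ k → M + 2 - k ≤ f →
      solveLoop f A (M : Int) ((k : Nat) : Int) total =
        total + ∑ j ∈ Finset.Ico k (M + 1), pvTerm A M j := by
  intro f
  induction f with
  | zero =>
      intro k total hk hf
      rw [Finset.Ico_eq_empty (by simp; omega)]
      simp [solveLoop]
  | succ f ih =>
      intro k total hk hf
      simp only [solveLoop]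
      rw [p1_eval k, p2_eval k]
      by_cases hbrk : ((q1 k : Nat) : Int) > (M : Int)
      · rw [if_pos hbrk]
        have hq1 : M < q1 k := by exact_mod_cast hbrk
        have hzero : ∀ j ∈ Finset.Ico k (M + 1), pvTerm A M j = 0 := by
          intro j hj
          rw [Finset.mem_Ico] at hj
          have hq1j : M < q1 j := lt_of_lt_of_le hq1 (q1_mono (by omega) hj.1)
          have hq2j : M < q2 j := lt_of_lt_of_le hq1j (q1_le_q2 (show 0 < j by omega))
          exact pvTerm_zero (by omega) (by omega)
        rw [Finset.sum_congr rfl hzero]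
        simp
      · rw [if_neg hbrk]
        push_neg at hbrk
        have hq1 : q1 k ≤ M := by exact_mod_cast hbrk
        have hkM : k < M + 1 := by have := q1_ge k; omega
        rw [Finset.sum_eq_sum_Ico_succ_bot hkM (pvTerm A M)]
        have hcast : ((k : Int) + 1) = ((k + 1 : Nat) : Int) := by push_cast; ring
        rw [hcast, ih (k + 1) _ (by omega) (by omega)]
        have hstep :
            (if ((q2 k : Nat) : Int) ≤ (M : Int) ∧ pvIsPal (toBase ((q2 k : Nat) : Int) A) = true
              then (if pvIsPal (toBase ((q1 k : Nat) : Int) A) = true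
                      then total + ((q1 k : Nat) : Int) else total) + ((q2 k : Nat) : Int)
              else (if pvIsPal (toBase ((q1 k : Nat) : Int) A) = true
                      then total + ((q1 k : Nat) : Int) else total)) = total + pvTerm A M k := by
          unfold pvTerm
          have hc : (((q2 k : Nat) : Int) ≤ (M : Int)) ↔ q2 k ≤ M := Nat.cast_le
          simp only [hq1, true_and, hc]
          split_ifs <;> ring
        rw [hstep]
        ring

lemma solve_eq_sum (A : Int) (M : Nat) :
    solve A ((M : Nat) : Int) = ∑ j ∈ Finset.Ico 1 (M + 1), pvTerm A M j := by
  unfold solve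
  rw [show ((M : Nat) : Int).toNat = M by simp]
  rw [show (1 : Int) = ((1 : Nat) : Int) by norm_num]
  rw [solveLoop_sum A M (M + 1) 1 0 le_rfl (by omega)]
  ring

-- ===== B side =====

-- the common summand: p if p ≤ M and p is palindromic in base A, else 0
def pvW (A : Int) (M : Nat) (p : Nat) : Int :=
  if p ≤ M ∧ pvIsPal (toBase ((p : Nat) : Int) A) = true then ((p : Nat) : Int) else 0

lemma pvTerm_eq_pvW (A : Int) (M j : Nat) :
    pvTerm A M j = pvW A M (q1 j) + pvW A M (q2 j) := rfl

lemma pvW_zero {A : Int} {M p : Nat} (h : M < p) : pvW A M p = 0 := by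
  unfold pvW
  rw [if_neg (fun hc => absurd hc.1 (by omega))]

lemma rev10Loop_zero_x (f : Nat) (r : Int) : rev10Loop f 0 r = r := by
  cases f <;> simp [rev10Loop]

lemma rev10Loop_spec : ∀ (f : Nat) (m : Nat) (r : Int), 0 < m → m ≤ f →
    rev10Loop f ((m : Nat) : Int) r =
      r * (10 : Int) ^ (Nat.toDigits 10 m).length + ((valC ((Nat.toDigits 10 m).reverse) : Nat) : Int) := by
  intro f
  induction f with
  | zero => intro m r hm hf; omega
  | succ f ih =>
      intro m r hm hf
      simp only [rev10Loop]
      rw [if_pos (by exact_mod_cast hm)]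
      have hfd : PySem.Int.floordiv ((m : Nat) : Int) 10 = (((m / 10 : Nat)) : Int) := by
        simpa using PySem.Int.floordiv_natCast m 10
      have hmd : PySem.Int.mod ((m : Nat) : Int) 10 = (((m % 10 : Nat)) : Int) := by
        simpa using PySem.Int.mod_natCast m 10
      rw [hfd, hmd]
      by_cases hlt : m < 10
      · rw [show m / 10 = 0 by omega]
        rw [show (((0 : Nat)) : Int) = 0 by norm_num, rev10Loop_zero_x]
        rw [Nat.toDigits_of_lt_base hlt]
        have hv : valC [Nat.digitChar m] = m := by
          rw [valC_cons]; simp [valC, dV_digitChar hlt]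
        simp only [List.reverse_singleton, List.length_singleton, hv]
        rw [show m % 10 = m by omega]
        push_cast
        ring
      · push_neg at hlt
        have h1 : 0 < m / 10 := by omega
        have h2 : m / 10 ≤ f := by
          have : m / 10 < m := Nat.div_lt_self (by omega) (by norm_num)
          omega
        rw [ih (m / 10) _ h1 h2]
        rw [Nat.toDigits_of_base_le (by norm_num) hlt]
        rw [List.reverse_append, List.reverse_singleton, List.singleton_append, valC_cons]
        rw [List.length_append, List.length_singleton, List.length_reverse]
        rw [dV_digitChar (Nat.mod_lt _ (by norm_num))]
        push_cast
        ring

lemma rev10_natCast {m : Nat} (hm : 0 < m) :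
    rev10 ((m : Nat) : Int) = ((valC ((Nat.toDigits 10 m).reverse) : Nat) : Int) := by
  unfold rev10
  rw [show ((m : Nat) : Int).toNat = m by simp]
  rw [rev10Loop_spec m m 0 hm le_rfl]
  ring

lemma toDigits_len_eq {h ℓ : Nat} (hℓ : 1 ≤ ℓ) (h1 : 10 ^ (ℓ - 1) ≤ h) (h2 : h < 10 ^ ℓ) :
    (Nat.toDigits 10 h).length = ℓ := by
  have hone : (1 : Nat) ≤ 10 ^ (ℓ - 1) := Nat.one_le_pow _ _ (by norm_num)
  have hpos : 0 < h := by omega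
  have ha := toDigits_ge hpos
  have hb := toDigits_lt h
  have hlen1 := Nat.length_toDigits_pos (b := 10) (n := h)
  have c1 : (Nat.toDigits 10 h).length - 1 < ℓ := by
    by_contra hc
    push_neg at hc
    have : 10 ^ ℓ ≤ 10 ^ ((Nat.toDigits 10 h).length - 1) :=
      Nat.pow_le_pow_right (by norm_num) hc
    omega
  have c2 : ℓ - 1 < (Nat.toDigits 10 h).length := by
    by_contra hc
    push_neg at hc
    have : 10 ^ (Nat.toDigits 10 h).length ≤ 10 ^ (ℓ - 1) :=
      Nat.pow_le_pow_right (by norm_num) hc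
    omega
  omega

lemma toDigits_div10 {h : Nat} (hh : 10 ≤ h) :
    Nat.toDigits 10 (h / 10) = (Nat.toDigits 10 h).dropLast := by
  rw [Nat.toDigits_of_base_le (by norm_num) hh]
  simp

lemma p_odd_eval {ℓ h : Nat} (hℓ : 1 ≤ ℓ) (h1 : 10 ^ (ℓ - 1) ≤ h) (h2 : h < 10 ^ ℓ) :
    ((h : Nat) : Int) * (((10 ^ (ℓ - 1) : Nat)) : Int) + rev10 (PySem.Int.floordiv ((h : Nat) : Int) 10) =
      ((q1 h : Nat) : Int) := by
  have hfd : PySem.Int.floordiv ((h : Nat) : Int) 10 = (((h / 10 : Nat)) : Int) := by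
    simpa using PySem.Int.floordiv_natCast h 10
  rw [hfd]
  have hlen : (Nat.toDigits 10 h).length = ℓ := toDigits_len_eq hℓ h1 h2
  have hq := q1_eq h
  rw [hlen] at hq
  by_cases hsm : h < 10
  · rw [show h / 10 = 0 by omega, show (((0 : Nat)) : Int) = 0 by norm_num]
    rw [show rev10 0 = 0 from rfl, hq]
    rw [Nat.toDigits_of_lt_base hsm]
    rw [show ([Nat.digitChar h] : List Char).dropLast = [] from rfl, List.reverse_nil]
    simp [valC]
  · push_neg at hsm
    have hd10 : 0 < h / 10 := by omega
    rw [rev10_natCast hd10, toDigits_div10 hsm, hq]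
    push_cast
    ring

lemma p_even_eval {ℓ h : Nat} (hℓ : 1 ≤ ℓ) (h1 : 10 ^ (ℓ - 1) ≤ h) (h2 : h < 10 ^ ℓ) :
    ((h : Nat) : Int) * (((10 ^ ℓ : Nat)) : Int) + rev10 (PySem.Int.floordiv ((h : Nat) : Int) 1) =
      ((q2 h : Nat) : Int) := by
  have hone : (1 : Nat) ≤ 10 ^ (ℓ - 1) := Nat.one_le_pow _ _ (by norm_num)
  have hpos : 0 < h := by omega
  have hfd : PySem.Int.floordiv ((h : Nat) : Int) 1 = ((h : Nat) : Int) := by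
    have := PySem.Int.floordiv_natCast h 1
    simpa using this
  rw [hfd, rev10_natCast hpos]
  have hq := q2_eq h
  rw [toDigits_len_eq hℓ h1 h2] at hq
  rw [hq]
  push_cast
  ring

lemma q2_mono {m n : Nat} (hm : 0 < m) (h : m ≤ n) : q2 m ≤ q2 n := by
  rcases eq_or_lt_of_le h with rfl | h
  · exact le_rfl
  · exact le_of_lt (q2_strict_mono hm h)

lemma innerB_odd (A : Int) (M : Nat) (ℓ : Nat) (hℓ : 1 ≤ ℓ) :
    ∀ (c h : Nat) (total : Int), 10 ^ (ℓ - 1) ≤ h → h + c = 10 ^ ℓ →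
      innerLoopB c ((h : Nat) : Int) (((10 ^ (ℓ - 1) : Nat)) : Int) 10 A ((M : Nat) : Int) total =
        total + ∑ x ∈ Finset.Ico h (10 ^ ℓ), pvW A M (q1 x) := by
  intro c
  induction c with
  | zero =>
      intro h total h1 h2
      rw [Finset.Ico_eq_empty (by simp; omega)]
      simp [innerLoopB]
  | succ c ih =>
      intro h total h1 h2
      have hlt : h < 10 ^ ℓ := by omega
      have hone : (1 : Nat) ≤ 10 ^ (ℓ - 1) := Nat.one_le_pow _ _ (by norm_num)
      simp only [innerLoopB]
      rw [p_odd_eval hℓ h1 hlt]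
      by_cases hbrk : ((q1 h : Nat) : Int) > ((M : Nat) : Int)
      · rw [if_pos hbrk]
        have hq : M < q1 h := by exact_mod_cast hbrk
        have hz : ∀ x ∈ Finset.Ico h (10 ^ ℓ), pvW A M (q1 x) = 0 := by
          intro x hx
          rw [Finset.mem_Ico] at hx
          exact pvW_zero (lt_of_lt_of_le hq (q1_mono (by omega) hx.1))
        rw [Finset.sum_congr rfl hz]
        simp
      · rw [if_neg hbrk]
        push_neg at hbrk
        have hq : q1 h ≤ M := by exact_mod_cast hbrk
        rw [Finset.sum_eq_sum_Ico_succ_bot hlt]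
        rw [show ((h : Nat) : Int) + 1 = (((h + 1 : Nat)) : Int) by push_cast; ring]
        rw [ih (h + 1) _ (by omega) (by omega)]
        unfold pvW
        simp only [hq, true_and]
        split_ifs <;> ring

lemma innerB_even (A : Int) (M : Nat) (ℓ : Nat) (hℓ : 1 ≤ ℓ) :
    ∀ (c h : Nat) (total : Int), 10 ^ (ℓ - 1) ≤ h → h + c = 10 ^ ℓ →
      innerLoopB c ((h : Nat) : Int) (((10 ^ ℓ : Nat)) : Int) 1 A ((M : Nat) : Int) total =
        total + ∑ x ∈ Finset.Ico h (10 ^ ℓ), pvW A M (q2 x) := by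
  intro c
  induction c with
  | zero =>
      intro h total h1 h2
      rw [Finset.Ico_eq_empty (by simp; omega)]
      simp [innerLoopB]
  | succ c ih =>
      intro h total h1 h2
      have hlt : h < 10 ^ ℓ := by omega
      have hone : (1 : Nat) ≤ 10 ^ (ℓ - 1) := Nat.one_le_pow _ _ (by norm_num)
      simp only [innerLoopB]
      rw [p_even_eval hℓ h1 hlt]
      by_cases hbrk : ((q2 h : Nat) : Int) > ((M : Nat) : Int)
      · rw [if_pos hbrk]
        have hq : M < q2 h := by exact_mod_cast hbrk
        have hz : ∀ x ∈ Finset.Ico h (10 ^ ℓ), pvW A M (q2 x) = 0 := by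
          intro x hx
          rw [Finset.mem_Ico] at hx
          exact pvW_zero (lt_of_lt_of_le hq (q2_mono (by omega) hx.1))
        rw [Finset.sum_congr rfl hz]
        simp
      · rw [if_neg hbrk]
        push_neg at hbrk
        have hq : q2 h ≤ M := by exact_mod_cast hbrk
        rw [Finset.sum_eq_sum_Ico_succ_bot hlt]
        rw [show ((h : Nat) : Int) + 1 = (((h + 1 : Nat)) : Int) by push_cast; ring]
        rw [ih (h + 1) _ (by omega) (by omega)]
        unfold pvW
        simp only [hq, true_and]
        split_ifs <;> ring

-- the contribution of one digit length L in B's outer loop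
def pvS (A : Int) (M : Nat) (L : Nat) : Int :=
  ∑ x ∈ Finset.Ico (10 ^ ((L - 1) / 2)) (10 ^ ((L + 1) / 2)),
    pvW A M (if L % 2 = 1 then q1 x else q2 x)

lemma outerB_sum (A : Int) (M : Nat) (hM : 1 ≤ M) :
    ∀ (f k : Nat) (total : Int), 1 ≤ k → (Nat.toDigits 10 M).length + 2 - k ≤ f →
      outerLoopB f A ((M : Nat) : Int) ((k : Nat) : Int) total =
        total + ∑ L ∈ Finset.Ico k ((Nat.toDigits 10 M).length + 1), pvS A M L := by
  intro f
  induction f with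
  | zero =>
      intro k total hk hf
      rw [Finset.Ico_eq_empty (by simp; omega)]
      simp [outerLoopB]
  | succ f ih =>
      intro k total hk hf
      set D := (Nat.toDigits 10 M).length with hD
      simp only [outerLoopB]
      have hexp : (((k : Nat) : Int) - 1).toNat = k - 1 := by omega
      rw [hexp]
      have hcast10 : (10 : Int) ^ (k - 1) = (((10 ^ (k - 1) : Nat)) : Int) := by push_cast; ring
      by_cases hkD : k ≤ D
      · have hcond : (10 : Int) ^ (k - 1) ≤ ((M : Nat) : Int) := by
          rw [hcast10]
          have h1 : 10 ^ (k - 1) ≤ 10 ^ (D - 1) := Nat.pow_le_pow_right (by norm_num) (by omega)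
          have h2 : 10 ^ (D - 1) ≤ M := toDigits_ge (by omega)
          exact_mod_cast le_trans h1 h2
        rw [if_pos hcond]
        have hfd1 : PySem.Int.floordiv (((k : Nat) : Int) - 1) 2 = (((k - 1) / 2 : Nat) : Int) := by
          rw [show ((k : Nat) : Int) - 1 = (((k - 1 : Nat)) : Int) by omega]
          simpa using PySem.Int.floordiv_natCast (k - 1) 2
        have hfd2 : PySem.Int.floordiv (((k : Nat) : Int) + 1) 2 = (((k + 1) / 2 : Nat) : Int) := by
          rw [show ((k : Nat) : Int) + 1 = (((k + 1 : Nat)) : Int) by push_cast; ring]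
          simpa using PySem.Int.floordiv_natCast (k + 1) 2
        have hfd3 : PySem.Int.floordiv ((k : Nat) : Int) 2 = ((k / 2 : Nat) : Int) := by
          simpa using PySem.Int.floordiv_natCast k 2
        have hmd : PySem.Int.mod ((k : Nat) : Int) 2 = ((k % 2 : Nat) : Int) := by
          simpa using PySem.Int.mod_natCast k 2
        rw [hfd1, hfd2, hfd3, hmd]
        have htn : ∀ a : Nat, (((a : Nat) : Int)).toNat = a := fun a => by simp
        rw [htn, htn, htn]
        set ℓ := (k + 1) / 2 with hℓdef
        have hℓ1 : 1 ≤ ℓ := by omega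
        have hlo : (k - 1) / 2 = ℓ - 1 := by omega
        have hhip : (10 : Int) ^ ℓ = (((10 ^ ℓ : Nat)) : Int) := by push_cast; ring
        have hlop : (10 : Int) ^ (ℓ - 1) = (((10 ^ (ℓ - 1) : Nat)) : Int) := by push_cast; ring
        have hpowle : (10 : Nat) ^ (ℓ - 1) ≤ 10 ^ ℓ := Nat.pow_le_pow_right (by norm_num) (by omega)
        have hfuel : ((10 : Int) ^ ℓ - (10 : Int) ^ (ℓ - 1)).toNat = 10 ^ ℓ - 10 ^ (ℓ - 1) := by
          rw [hhip, hlop]; omega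
        have hkD1 : k < D + 1 := by omega
        rw [Finset.sum_eq_sum_Ico_succ_bot hkD1]
        rw [show ((k : Nat) : Int) + 1 = (((k + 1 : Nat)) : Int) by push_cast; ring]
        by_cases hpar : k % 2 = 1
        · have hmid : k / 2 = ℓ - 1 := by omega
          rw [hlo, hmid, hfuel, hlop]
          split_ifs with hd
          case neg =>
            have : (k % 2 : Nat) = 0 := by exact_mod_cast not_not.mp hd
            omega
          rw [innerB_odd A M ℓ hℓ1 (10 ^ ℓ - 10 ^ (ℓ - 1)) (10 ^ (ℓ - 1)) total le_rfl (by omega)]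
          rw [ih (k + 1) _ (by omega) (by omega)]
          have hS : pvS A M k = ∑ x ∈ Finset.Ico (10 ^ (ℓ - 1)) (10 ^ ℓ), pvW A M (q1 x) := by
            unfold pvS
            rw [hlo, ← hℓdef]
            apply Finset.sum_congr rfl
            intro x _
            rw [if_pos hpar]
          rw [hS]
          ring
        · have hpar0 : k % 2 = 0 := by omega
          have hmid : k / 2 = ℓ := by omega
          rw [hlo, hmid, hfuel, hlop, hhip]
          split_ifs with hd
          case pos =>
            exact absurd (by rw [hpar0]; norm_num) hd
          rw [innerB_even A M ℓ hℓ1 (10 ^ ℓ - 10 ^ (ℓ - 1)) (10 ^ (ℓ - 1)) total le_rfl (by omega)]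
          rw [ih (k + 1) _ (by omega) (by omega)]
          have hS : pvS A M k = ∑ x ∈ Finset.Ico (10 ^ (ℓ - 1)) (10 ^ ℓ), pvW A M (q2 x) := by
            unfold pvS
            rw [hlo, ← hℓdef]
            apply Finset.sum_congr rfl
            intro x _
            rw [if_neg (by omega)]
          rw [hS]
          ring
      · have hcond : ¬ (10 : Int) ^ (k - 1) ≤ ((M : Nat) : Int) := by
          rw [hcast10]
          have h1 : M < 10 ^ D := toDigits_lt M
          have h2 : 10 ^ D ≤ 10 ^ (k - 1) := Nat.pow_le_pow_right (by norm_num) (by omega)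
          have : M < 10 ^ (k - 1) := by omega
          exact_mod_cast not_le.mpr this
        rw [if_neg hcond]
        rw [Finset.Ico_eq_empty (by simp; omega)]
        simp

lemma digitlen_le_self {M : Nat} (hM : 1 ≤ M) : (Nat.toDigits 10 M).length ≤ M := by
  set D := (Nat.toDigits 10 M).length with hD
  have h1 : 10 ^ (D - 1) ≤ M := toDigits_ge (by omega)
  have h2 : D - 1 < 2 ^ (D - 1) := Nat.lt_two_pow_self
  have h3 : 2 ^ (D - 1) ≤ 10 ^ (D - 1) := Nat.pow_le_pow_left (by norm_num) _
  omega

lemma solve_alt_eq_sum (A : Int) (M : Nat) (hM : 1 ≤ M) :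
    solve_alt A ((M : Nat) : Int) = ∑ L ∈ Finset.Ico 1 ((Nat.toDigits 10 M).length + 1), pvS A M L := by
  unfold solve_alt
  rw [show (((M : Nat) : Int)).toNat = M by simp]
  rw [show (1 : Int) = ((1 : Nat) : Int) by norm_num]
  rw [outerB_sum A M hM (M + 2) 1 0 le_rfl (by have := digitlen_le_self hM; omega)]
  ring

-- pvS vanishes for lengths beyond that of M
lemma pvS_zero {A : Int} {M L : Nat} (hM : 1 ≤ M) (hL : (Nat.toDigits 10 M).length < L) :
    pvS A M L = 0 := by
  unfold pvS
  apply Finset.sum_eq_zero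
  intro x hx
  rw [Finset.mem_Ico] at hx
  set ℓ := (L + 1) / 2 with hℓdef
  have hL1 : 1 ≤ L := by omega
  have hℓ1 : 1 ≤ ℓ := by omega
  have hlo : (L - 1) / 2 = ℓ - 1 := by omega
  rw [hlo] at hx
  have hxlen : (Nat.toDigits 10 x).length = ℓ := toDigits_len_eq hℓ1 hx.1 hx.2
  have hone : (1 : Nat) ≤ 10 ^ (ℓ - 1) := Nat.one_le_pow _ _ (by norm_num)
  have hxpos : 0 < x := by omega
  have hMlt : M < 10 ^ (Nat.toDigits 10 M).length := toDigits_lt M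
  by_cases hpar : L % 2 = 1
  · rw [if_pos hpar]
    apply pvW_zero
    have hlen : (Nat.toDigits 10 (q1 x)).length = 2 * ℓ - 1 := by
      rw [q1_len hxpos, hxlen]
    have hge : 10 ^ (2 * ℓ - 1 - 1) ≤ q1 x := by
      have := toDigits_ge (n := q1 x) (by have := q1_ge x; omega)
      rwa [hlen] at this
    have hexp : (Nat.toDigits 10 M).length ≤ 2 * ℓ - 1 - 1 := by omega
    have := Nat.pow_le_pow_right (show 1 ≤ 10 by norm_num) hexp
    omega
  · rw [if_neg hpar]
    apply pvW_zero
    have hq2pos : 0 < q2 x := by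
      have := q1_ge x
      have := q1_le_q2 hxpos
      omega
    have hlen : (Nat.toDigits 10 (q2 x)).length = 2 * ℓ := by
      rw [q2_len hxpos, hxlen]
    have hge : 10 ^ (2 * ℓ - 1) ≤ q2 x := by
      have := toDigits_ge hq2pos
      rwa [hlen] at this
    have hexp : (Nat.toDigits 10 M).length ≤ 2 * ℓ - 1 := by omega
    have := Nat.pow_le_pow_right (show 1 ≤ 10 by norm_num) hexp
    omega

-- regroup the lengths 1..2K by parity into halves-decade double sums
lemma sum_S_regroup (A : Int) (M : Nat) : ∀ K : Nat,
    ∑ L ∈ Finset.Ico 1 (2 * K + 1), pvS A M L =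
      (∑ ℓ ∈ Finset.Ico 1 (K + 1), ∑ x ∈ Finset.Ico (10 ^ (ℓ - 1)) (10 ^ ℓ), pvW A M (q1 x)) +
      (∑ ℓ ∈ Finset.Ico 1 (K + 1), ∑ x ∈ Finset.Ico (10 ^ (ℓ - 1)) (10 ^ ℓ), pvW A M (q2 x)) := by
  intro K
  induction K with
  | zero => simp
  | succ K ih =>
      rw [show 2 * (K + 1) + 1 = (2 * K + 1) + 1 + 1 by ring]
      rw [Finset.sum_Ico_succ_top (by omega), Finset.sum_Ico_succ_top (by omega), ih]
      rw [Finset.sum_Ico_succ_top (show 1 ≤ K + 1 by omega),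
          Finset.sum_Ico_succ_top (show 1 ≤ K + 1 by omega)]
      have hodd : pvS A M (2 * K + 1) =
          ∑ x ∈ Finset.Ico (10 ^ (K + 1 - 1)) (10 ^ (K + 1)), pvW A M (q1 x) := by
        unfold pvS
        rw [show (2 * K + 1 - 1) / 2 = K + 1 - 1 by omega, show (2 * K + 1 + 1) / 2 = K + 1 by omega]
        apply Finset.sum_congr rfl
        intro x _
        rw [if_pos (by omega)]
      have heven : pvS A M (2 * K + 1 + 1) =
          ∑ x ∈ Finset.Ico (10 ^ (K + 1 - 1)) (10 ^ (K + 1)), pvW A M (q2 x) := by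
        unfold pvS
        rw [show (2 * K + 1 + 1 - 1) / 2 = K + 1 - 1 by omega,
            show (2 * K + 1 + 1 + 1) / 2 = K + 1 by omega]
        apply Finset.sum_congr rfl
        intro x _
        rw [if_neg (by omega)]
      rw [hodd, heven]
      ring

-- decades 1..K recompose into the full interval [1, 10^K)
lemma sum_decades (g : Nat → Int) : ∀ K : Nat,
    ∑ ℓ ∈ Finset.Ico 1 (K + 1), ∑ x ∈ Finset.Ico (10 ^ (ℓ - 1)) (10 ^ ℓ), g x =
      ∑ x ∈ Finset.Ico 1 (10 ^ K), g x := by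
  intro K
  induction K with
  | zero => simp
  | succ K ih =>
      rw [Finset.sum_Ico_succ_top (by omega), ih]
      rw [show K + 1 - 1 = K by omega]
      exact Finset.sum_Ico_consecutive g (Nat.one_le_pow _ _ (by norm_num))
        (Nat.pow_le_pow_right (by norm_num) (by omega))

lemma sum_term_eq (A : Int) (M : Nat) (hM : 1 ≤ M) :
    ∑ j ∈ Finset.Ico 1 (M + 1), pvTerm A M j =
      ∑ L ∈ Finset.Ico 1 ((Nat.toDigits 10 M).length + 1), pvS A M L := by
  set D := (Nat.toDigits 10 M).length with hD
  have hD1 : 1 ≤ D := Nat.length_toDigits_pos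
  -- extend B's sum with zero terms up to length 2D
  have hext : ∑ L ∈ Finset.Ico 1 (D + 1), pvS A M L = ∑ L ∈ Finset.Ico 1 (2 * D + 1), pvS A M L := by
    rw [← Finset.sum_Ico_consecutive (pvS A M) (show 1 ≤ D + 1 by omega) (show D + 1 ≤ 2 * D + 1 by omega)]
    have hz : ∑ L ∈ Finset.Ico (D + 1) (2 * D + 1), pvS A M L = 0 :=
      Finset.sum_eq_zero (fun L hL => pvS_zero hM (by rw [Finset.mem_Ico] at hL; omega))
    rw [hz]
    ring
  rw [hext, sum_S_regroup, sum_decades, sum_decades]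
  -- extend A's sum with zero terms up to 10^D
  have hMlt : M < 10 ^ D := toDigits_lt M
  have hsplit2 : ∑ j ∈ Finset.Ico 1 (M + 1), pvTerm A M j =
      ∑ j ∈ Finset.Ico 1 (10 ^ D), pvTerm A M j := by
    rw [← Finset.sum_Ico_consecutive (pvTerm A M) (show 1 ≤ M + 1 by omega)
          (show M + 1 ≤ 10 ^ D by omega)]
    have hz : ∑ j ∈ Finset.Ico (M + 1) (10 ^ D), pvTerm A M j = 0 := by
      apply Finset.sum_eq_zero
      intro j hj
      rw [Finset.mem_Ico] at hj
      have hq1 : M < q1 j := by have := q1_ge j; omega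
      have hq2 : M < q2 j := by have := q1_le_q2 (show 0 < j by omega); omega
      rw [pvTerm_eq_pvW, pvW_zero hq1, pvW_zero hq2]
      ring
    rw [hz]
    ring
  rw [hsplit2, ← Finset.sum_add_distrib]
  apply Finset.sum_congr rfl
  intro j _
  exact pvTerm_eq_pvW A M j

-- ===== VERDICT (by name: the statement is the Claim_ definition above) =====
theorem solve_spec : Claim_equal_solve := by
  unfold Claim_equal_solve Spec_solve
  intro A N _ _
  by_cases hN : N < 1
  · have hA : solve A N = 0 := by
      unfold solve
      rw [show N.toNat = 0 by omega]
      simp only [solveLoop]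
      rw [show intDigits (PySem.Int.toChars 1 ++
            ((PySem.List.slice? (PySem.Int.toChars 1) (some (-2)) none (-1)).getD [])) = 1 by decide]
      rw [if_pos (by omega)]
    have hB : solve_alt A N = 0 := by
      unfold solve_alt
      rw [show N.toNat = 0 by omega]
      simp only [outerLoopB]
      rw [if_neg (by norm_num; omega)]
    rw [hA, hB]
  · push_neg at hN
    have hNM : N = ((N.toNat : Nat) : Int) := by omega
    have hM1 : 1 ≤ N.toNat := by omega
    rw [hNM, solve_eq_sum, solve_alt_eq_sum A N.toNat hM1, sum_term_eq A N.toNat hM1]
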